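-- pv_equiv track=rewrite | github.com/henrycgbaker/llenergymeasure | src/llenergymeasure/api/report_gaps.py | _field_value_distribution
-- ===== SOURCE A (Python) =====
-- from typing import Any, Literal
--
-- def _field_value_distribution(
--     fired: list[dict[str, Any]],
--     not_fired: list[dict[str, Any]],
-- ) -> dict[str, dict[str, list[str]]]:
--     """Return per-field string-ified value sets for the A and B partitions.
--
--     Useful to reviewers when the inferred predicate is missing or narrow:
--     the distribution tells you which fields actually vary across the A
--     partition and which are constant.
--     """
--     out: dict[str, dict[str, list[str]]] = {}
--     fields = sorted({k for c in fired + not_fired for k in c})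
--     for f in fields:
--         out[f] = {
--             "fired": sorted({str(c.get(f)) for c in fired}),
--             "not_fired": sorted({str(c.get(f)) for c in not_fired}),
--         }
--     return out
-- ===== SOURCE B (Python) =====
-- def _collect(records):
--     """One pass over all records: field -> (set of stringified values, number of records containing the field)."""
--     acc = {}
--     for c in records:
--         for k, v in c.items():
--             s, n = acc.get(k, (None, 0))
--             if s is None:
--                 s = set()
--             s.add(str(v))
--             acc[k] = (s, n + 1)
--     return acc
--
--
-- def _field_value_distribution(fired, not_fired):
--     a, b = _collect(fired), _collect(not_fired)
--     out = {}
--     for f in sorted(a.keys() | b.keys()):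
--         sa, na = a.get(f, (set(), 0))
--         sb, nb = b.get(f, (set(), 0))
--         if na < len(fired):
--             sa.add("None")
--         if nb < len(not_fired):
--             sb.add("None")
--         out[f] = {"fired": sorted(sa), "not_fired": sorted(sb)}
--     return out
-- ===== Notes on version B (the rewrite author's own statement) =====
-- stated objective: faster
-- what changed: A scans both full partitions once per field (building and sorting a value set per field per partition); B makes a single bucketing pass over all records, accumulating per field a value set and a presence count per partition, and only adds 'None' where the count shows the field was missing from some record.
import Mathlib
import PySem

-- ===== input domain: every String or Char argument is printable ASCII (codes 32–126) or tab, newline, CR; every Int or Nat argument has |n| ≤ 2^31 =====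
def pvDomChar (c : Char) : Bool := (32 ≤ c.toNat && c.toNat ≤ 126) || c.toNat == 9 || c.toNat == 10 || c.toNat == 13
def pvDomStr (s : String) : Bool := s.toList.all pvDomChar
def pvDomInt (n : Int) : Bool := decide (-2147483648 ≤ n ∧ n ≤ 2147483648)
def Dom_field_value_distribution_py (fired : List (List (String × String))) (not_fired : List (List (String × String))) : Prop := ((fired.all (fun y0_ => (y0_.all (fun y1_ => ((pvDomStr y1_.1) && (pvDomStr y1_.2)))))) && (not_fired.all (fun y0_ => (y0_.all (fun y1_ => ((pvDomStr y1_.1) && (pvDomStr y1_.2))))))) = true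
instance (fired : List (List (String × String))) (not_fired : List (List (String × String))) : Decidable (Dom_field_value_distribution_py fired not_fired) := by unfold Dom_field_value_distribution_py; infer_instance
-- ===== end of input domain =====

-- B replaces A's per-field rescans of both partitions by a single bucketing pass
-- (field → value set + presence count per partition); objective: faster.
-- Values are strings here, so Python's str(v) is v itself and str(None) is "None".

-- ===== PORT A =====

-- str(c.get(f)): the value of field f in record c, or "None" when the field is missing
def pyStrGet (c : List (String × String)) (f : String) : String :=
  match (PySem.Dict.mk c).get? f with
  | some v => v
  | none => "None"

def field_value_distribution_py (fired : List (List (String × String))) (not_fired : List (List (String × String))) : List (String × List (String × List String)) :=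
  -- fields = sorted({k for c in fired + not_fired for k in c})
  let fields := PySem.List.sorted (PySem.Set.ofList ((fired ++ not_fired).flatMap (fun c => (PySem.Dict.mk c).keys))) (fun x => x) false
  -- for f in fields: out[f] = {"fired": sorted({str(c.get(f)) …}), "not_fired": …}
  fields.foldl (fun out f =>
    out ++ [(f, [("fired", PySem.List.sorted (PySem.Set.ofList (fired.map (fun c => pyStrGet c f))) (fun x => x) false),
                 ("not_fired", PySem.List.sorted (PySem.Set.ofList (not_fired.map (fun c => pyStrGet c f))) (fun x => x) false)])]) []

-- ===== PORT B =====

-- one item (k, v): add str(v) to k's value set, bump k's record count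
def addPair (acc : PySem.Dict String (PySem.Set String × Int)) (kv : String × String) : PySem.Dict String (PySem.Set String × Int) :=
  acc.insert kv.1 ((acc.getD kv.1 (PySem.Set.empty, 0)).1.add kv.2, (acc.getD kv.1 (PySem.Set.empty, 0)).2 + 1)

-- _collect(records): field -> (set of stringified values, number of records containing the field)
def collectB (records : List (List (String × String))) : PySem.Dict String (PySem.Set String × Int) :=
  records.foldl (fun acc c => c.foldl addPair acc) PySem.Dict.empty

def field_value_distribution_py_alt (fired : List (List (String × String))) (not_fired : List (List (String × String))) : List (String × List (String × List String)) :=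
  let a := collectB fired
  let b := collectB not_fired
  let fields := PySem.List.sorted (PySem.Set.union (PySem.Set.ofList a.keys) b.keys) (fun x => x) false
  fields.foldl (fun out f =>
    let pa := a.getD f (PySem.Set.empty, 0)
    let pb := b.getD f (PySem.Set.empty, 0)
    let sa := if pa.2 < (fired.length : Int) then pa.1.add "None" else pa.1
    let sb := if pb.2 < (not_fired.length : Int) then pb.1.add "None" else pb.1
    out ++ [(f, [("fired", PySem.List.sorted sa (fun x => x) false),
                 ("not_fired", PySem.List.sorted sb (fun x => x) false)])]) []

-- ===== PRECONDITION & SPEC =====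
-- Pre_ excludes association lists in which some record carries a duplicate key: such a list
-- does not represent a Python dict (A's records are dicts, where keys are unique), and on it
-- A's first-match lookup and B's bucketing of every pair are both accidental readings.
def Pre_field_value_distribution_py (fired : List (List (String × String))) (not_fired : List (List (String × String))) : Prop :=
  (∀ c ∈ fired, (c.map Prod.fst).Nodup) ∧ (∀ c ∈ not_fired, (c.map Prod.fst).Nodup)
instance (fired : List (List (String × String))) (not_fired : List (List (String × String))) : Decidable (Pre_field_value_distribution_py fired not_fired) := by unfold Pre_field_value_distribution_py; infer_instance

def pvWitness_field_value_distribution_py : (List (List (String × String))) × (List (List (String × String))) :=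
  ([[("a", "1"), ("b", "2")], [("a", "3")]], [[("b", "2")]])

def Spec_field_value_distribution_py (fired : List (List (String × String))) (not_fired : List (List (String × String))) (out : List (String × List (String × List String))) : Prop := out = field_value_distribution_py_alt fired not_fired
instance (fired : List (List (String × String))) (not_fired : List (List (String × String))) (out : List (String × List (String × List String))) : Decidable (Spec_field_value_distribution_py fired not_fired out) := by unfold Spec_field_value_distribution_py; infer_instance

-- ===== CLAIM (what is proved, stated in full; the proofs are below) =====
def Claim_equal_field_value_distribution_py : Prop := ∀ (fired : List (List (String × String))) (not_fired : List (List (String × String))), Dom_field_value_distribution_py fired not_fired → Pre_field_value_distribution_py fired not_fired → Spec_field_value_distribution_py fired not_fired (field_value_distribution_py fired not_fired)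

-- ===== LEMMAS AND PROOFS =====

-- the first-match values of field f across the records that contain it
def valsOf (rs : List (List (String × String))) (f : String) : List String :=
  rs.filterMap (fun c => (PySem.Dict.mk c).get? f)

theorem foldl_addPair_getD (c : List (String × String)) (f : String)
    (h : (c.map Prod.fst).Nodup) (acc : PySem.Dict String (PySem.Set String × Int)) :
    (c.foldl addPair acc).getD f (PySem.Set.empty, 0) =
      match (PySem.Dict.mk c).get? f with
      | some v => ((acc.getD f (PySem.Set.empty, 0)).1.add v, (acc.getD f (PySem.Set.empty, 0)).2 + 1)
      | none => acc.getD f (PySem.Set.empty, 0) := by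
  induction c generalizing acc with
  | nil => rfl
  | cons kv t ih =>
    obtain ⟨k, v⟩ := kv
    simp only [List.map_cons, List.nodup_cons] at h
    by_cases hk : k = f
    · subst hk
      have hnot : (PySem.Dict.mk t).get? k = none := by
        rw [PySem.Dict.get?_eq_none_iff_not_mem_keys]
        simpa [PySem.Dict.keys, PySem.Dict.items] using h.1
      rw [List.foldl_cons, ih h.2, hnot, PySem.Dict.get?_mk_cons]
      simp [addPair, PySem.Dict.getD_insert_self]
    · have heq : (addPair acc (k, v)).getD f (PySem.Set.empty, 0) = acc.getD f (PySem.Set.empty, 0) := by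
        simp [addPair, PySem.Dict.getD_insert_of_ne _ _ _ (Ne.symm hk)]
      rw [List.foldl_cons, ih h.2, heq, PySem.Dict.get?_mk_cons]
      have hbeq : (k == f) = false := by simp [hk]
      rw [hbeq]
      simp

theorem foldl_record_getD (rs : List (List (String × String))) (f : String)
    (h : ∀ c ∈ rs, (c.map Prod.fst).Nodup) (acc : PySem.Dict String (PySem.Set String × Int)) :
    (rs.foldl (fun acc c => c.foldl addPair acc) acc).getD f (PySem.Set.empty, 0) =
      ((acc.getD f (PySem.Set.empty, 0)).1.update (valsOf rs f),
       (acc.getD f (PySem.Set.empty, 0)).2 + (rs.countP (fun c => ((PySem.Dict.mk c).get? f).isSome) : Int)) := by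
  induction rs generalizing acc with
  | nil => simp [valsOf, PySem.Set.update_nil]
  | cons c rs ih =>
    simp only [List.foldl_cons]
    rw [ih (fun c hc => h c (List.mem_cons_of_mem _ hc)),
        foldl_addPair_getD c f (h c (List.mem_cons_self))]
    cases hg : (PySem.Dict.mk c).get? f with
    | some v =>
      simp only [valsOf, List.filterMap_cons, hg, List.countP_cons, Option.isSome_some]
      rw [PySem.Set.update_cons]
      exact congrArg _ (by simp only [if_pos trivial]; push_cast; ring)
    | none =>
      simp only [valsOf, List.filterMap_cons, hg, List.countP_cons, Option.isSome_none]
      simp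

theorem collectB_getD (rs : List (List (String × String))) (f : String)
    (h : ∀ c ∈ rs, (c.map Prod.fst).Nodup) :
    (collectB rs).getD f (PySem.Set.empty, 0) =
      (PySem.Set.ofList (valsOf rs f),
       (rs.countP (fun c => ((PySem.Dict.mk c).get? f).isSome) : Int)) := by
  unfold collectB
  rw [foldl_record_getD rs f h]
  rw [PySem.Dict.getD_empty]
  simp [PySem.Set.update_nil_left]

theorem collectB_keys (rs : List (List (String × String))) :
    (collectB rs).keys = PySem.Set.ofList (rs.flatMap (fun c => c.map Prod.fst)) := by
  unfold collectB
  suffices hgen : ∀ acc : PySem.Dict String (PySem.Set String × Int),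
      (rs.foldl (fun acc c => c.foldl addPair acc) acc).keys =
        PySem.Set.update acc.keys (rs.flatMap (fun c => c.map Prod.fst)) by
    rw [hgen PySem.Dict.empty, PySem.Dict.keys_empty]
    exact PySem.Set.update_nil_left _
  induction rs with
  | nil => intro acc; simp [PySem.Set.update_nil]
  | cons c rs ih =>
    intro acc
    simp only [List.foldl_cons, List.flatMap_cons]
    have hk : (List.foldl addPair acc c).keys = PySem.Set.update acc.keys (c.map Prod.fst) :=
      PySem.Dict.keys_foldl_insert_key c Prod.fst
        (fun d kv => ((d.getD kv.1 (PySem.Set.empty, 0)).1.add kv.2, (d.getD kv.1 (PySem.Set.empty, 0)).2 + 1)) acc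
    rw [ih, hk, PySem.Set.update_append]

-- the per-partition value set of B has exactly A's members
theorem partition_sorted_eq (rs : List (List (String × String))) (f : String)
    (h : ∀ c ∈ rs, (c.map Prod.fst).Nodup) :
    PySem.List.sorted (PySem.Set.ofList (rs.map (fun c => pyStrGet c f))) (fun x => x) false =
      PySem.List.sorted
        (if ((collectB rs).getD f (PySem.Set.empty, 0)).2 < (rs.length : Int)
         then ((collectB rs).getD f (PySem.Set.empty, 0)).1.add "None"
         else ((collectB rs).getD f (PySem.Set.empty, 0)).1) (fun x => x) false := by
  rw [collectB_getD rs f h]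
  have hcnt : (((rs.countP (fun c => ((PySem.Dict.mk c).get? f).isSome)) : Int) < (rs.length : Int)) ↔
      ∃ c ∈ rs, (PySem.Dict.mk c).get? f = none := by
    rw [Int.ofNat_lt]
    constructor
    · intro hlt
      by_contra hno
      push Not at hno
      have : rs.countP (fun c => ((PySem.Dict.mk c).get? f).isSome) = rs.length :=
        List.countP_eq_length.mpr (fun c hc => by
          cases hg : (PySem.Dict.mk c).get? f with
          | none => exact absurd hg (hno c hc)
          | some v => simp)
      omega
    · rintro ⟨c, hc, hg⟩
      have hle := List.countP_le_length (p := fun c => ((PySem.Dict.mk c).get? f).isSome) (l := rs)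
      rcases Nat.lt_or_ge (rs.countP (fun c => ((PySem.Dict.mk c).get? f).isSome)) rs.length with h' | h'
      · exact h'
      · exfalso
        have heq : rs.countP (fun c => ((PySem.Dict.mk c).get? f).isSome) = rs.length := Nat.le_antisymm hle h'
        have := List.countP_eq_length.mp heq c hc
        rw [hg] at this
        simp at this
  rw [PySem.List.sorted_id_eq_sorted_id_iff_perm]
  have hn1 := PySem.Set.nodup_ofList (rs.map (fun c => pyStrGet c f))
  have hn2 : (if ((rs.countP (fun c => ((PySem.Dict.mk c).get? f).isSome)) : Int) < (rs.length : Int)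
      then (PySem.Set.ofList (valsOf rs f)).add "None" else PySem.Set.ofList (valsOf rs f)).Nodup := by
    split
    · exact PySem.Set.nodup_add _ _ (PySem.Set.nodup_ofList _)
    · exact PySem.Set.nodup_ofList _
  rw [List.perm_ext_iff_of_nodup hn1 hn2]
  intro x
  rw [PySem.Set.mem_ofList]
  constructor
  · rintro hx
    obtain ⟨c, hc, hcx⟩ := List.mem_map.mp hx
    unfold pyStrGet at hcx
    cases hg : (PySem.Dict.mk c).get? f with
    | some v =>
      rw [hg] at hcx
      simp only at hcx
      have hv : x ∈ PySem.Set.ofList (valsOf rs f) := by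
        rw [PySem.Set.mem_ofList]
        exact List.mem_filterMap.mpr ⟨c, hc, by rw [hg, hcx]⟩
      split
      · exact (PySem.Set.mem_add _ _ _).mpr (Or.inl hv)
      · exact hv
    | none =>
      rw [hg] at hcx
      simp only at hcx
      have hlt : ((rs.countP (fun c => ((PySem.Dict.mk c).get? f).isSome)) : Int) < (rs.length : Int) :=
        hcnt.mpr ⟨c, hc, hg⟩
      rw [if_pos hlt]
      exact (PySem.Set.mem_add _ _ _).mpr (Or.inr hcx.symm)
  · intro hx
    by_cases hlt : ((rs.countP (fun c => ((PySem.Dict.mk c).get? f).isSome)) : Int) < (rs.length : Int)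
    · rw [if_pos hlt] at hx
      rcases (PySem.Set.mem_add _ _ _).mp hx with hv | hnone
      · rw [PySem.Set.mem_ofList] at hv
        obtain ⟨c, hc, hg⟩ := List.mem_filterMap.mp hv
        exact List.mem_map.mpr ⟨c, hc, by simp [pyStrGet, hg]⟩
      · obtain ⟨c, hc, hg⟩ := hcnt.mp hlt
        exact List.mem_map.mpr ⟨c, hc, by simp [pyStrGet, hg, ← hnone]⟩
    · rw [if_neg hlt] at hx
      rw [PySem.Set.mem_ofList] at hx
      obtain ⟨c, hc, hg⟩ := List.mem_filterMap.mp hx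
      exact List.mem_map.mpr ⟨c, hc, by simp [pyStrGet, hg]⟩

theorem fields_eq (fired not_fired : List (List (String × String))) :
    PySem.List.sorted (PySem.Set.ofList ((fired ++ not_fired).flatMap (fun c => (PySem.Dict.mk c).keys))) (fun x => x) false =
      PySem.List.sorted (PySem.Set.union (PySem.Set.ofList (collectB fired).keys) (collectB not_fired).keys) (fun x => x) false := by
  rw [PySem.List.sorted_id_eq_sorted_id_iff_perm, collectB_keys, collectB_keys]
  rw [List.perm_ext_iff_of_nodup (PySem.Set.nodup_ofList _)
       (PySem.Set.nodup_union _ _ (PySem.Set.nodup_ofList _))]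
  intro x
  rw [PySem.Set.mem_ofList, PySem.Set.mem_union, PySem.Set.mem_ofList,
      PySem.Set.mem_ofList, PySem.Set.mem_ofList]
  simp only [List.mem_flatMap, List.mem_append, PySem.Dict.keys]
  constructor
  · rintro ⟨c, hc | hc, hx⟩
    · exact Or.inl ⟨c, hc, hx⟩
    · exact Or.inr ⟨c, hc, hx⟩
  · rintro (⟨c, hc, hx⟩ | ⟨c, hc, hx⟩)
    · exact ⟨c, Or.inl hc, hx⟩
    · exact ⟨c, Or.inr hc, hx⟩

-- ===== VERDICT (by name: the statement is the Claim_ definition above) =====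
theorem field_value_distribution_py_spec : Claim_equal_field_value_distribution_py := by
  intro fired not_fired _ hpre
  unfold Spec_field_value_distribution_py field_value_distribution_py field_value_distribution_py_alt
  rw [PySem.List.foldl_append_singleton_eq_map
        (f := fun f => (f, [("fired", PySem.List.sorted (PySem.Set.ofList (fired.map (fun c => pyStrGet c f))) (fun x => x) false),
                            ("not_fired", PySem.List.sorted (PySem.Set.ofList (not_fired.map (fun c => pyStrGet c f))) (fun x => x) false)])),
      PySem.List.foldl_append_singleton_eq_map
        (f := fun f => (f, [("fired", PySem.List.sorted
                              (if ((collectB fired).getD f (PySem.Set.empty, 0)).2 < (fired.length : Int)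
                               then ((collectB fired).getD f (PySem.Set.empty, 0)).1.add "None"
                               else ((collectB fired).getD f (PySem.Set.empty, 0)).1) (fun x => x) false),
                            ("not_fired", PySem.List.sorted
                              (if ((collectB not_fired).getD f (PySem.Set.empty, 0)).2 < (not_fired.length : Int)
                               then ((collectB not_fired).getD f (PySem.Set.empty, 0)).1.add "None"
                               else ((collectB not_fired).getD f (PySem.Set.empty, 0)).1) (fun x => x) false)]))]
  rw [fields_eq fired not_fired]
  simp only [List.nil_append]
  apply List.map_congr_left
  intro f _
  rw [partition_sorted_eq fired f hpre.1, partition_sorted_eq not_fired f hpre.2]
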